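-- pv_equiv track=rewrite | github.com/jvictor0/TiaraBoom | tiara/sentence_gen.py | ConstructSentence
-- ===== SOURCE A (Python) =====
-- def ConstructSentence(phr):
--     punc = False
--     first = True
--     result = []
--     for w in phr:
--         tpunc = (w in [",",".","?","!"])
--         if tpunc and first:
--             continue
--         if first:
--             result.append(w[0].upper() + w[1:])
--             first = False
--             continue
--         if punc and tpunc:
--             result[-1] = w
--         else:
--             result.append(w)
--         punc = tpunc
--     return result
-- ===== SOURCE B (Python) =====
-- PUNC = {",", ".", "?", "!"}
--
-- def ConstructSentence(phr):
--     # run-based pass: split phr into alternating runs of words / punctuation,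
--     # drop a leading punctuation run, collapse each punctuation run to its
--     # last token, and capitalize the first kept word at the end.
--     result = []
--     i = 0
--     n = len(phr)
--     while i < n:
--         j = i
--         if phr[i] in PUNC:
--             while j < n and phr[j] in PUNC:
--                 j += 1
--             if result:
--                 result.append(phr[j - 1])
--         else:
--             while j < n and phr[j] not in PUNC:
--                 j += 1
--             result.extend(phr[i:j])
--         i = j
--     if result:
--         result[0] = result[0][0].upper() + result[0][1:]
--     return result
-- ===== Notes on version B (the rewrite author's own statement) =====
-- stated objective: alternative
-- what changed: Replaced the punc/first flag state machine with back-mutation (result[-1] = w) by a run-based pass: scan maximal runs of word/punctuation tokens, drop a leading punctuation run, keep only the last token of each punctuation run, extend with word runs wholesale, and capitalize the first kept word once at the end.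
import Mathlib
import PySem

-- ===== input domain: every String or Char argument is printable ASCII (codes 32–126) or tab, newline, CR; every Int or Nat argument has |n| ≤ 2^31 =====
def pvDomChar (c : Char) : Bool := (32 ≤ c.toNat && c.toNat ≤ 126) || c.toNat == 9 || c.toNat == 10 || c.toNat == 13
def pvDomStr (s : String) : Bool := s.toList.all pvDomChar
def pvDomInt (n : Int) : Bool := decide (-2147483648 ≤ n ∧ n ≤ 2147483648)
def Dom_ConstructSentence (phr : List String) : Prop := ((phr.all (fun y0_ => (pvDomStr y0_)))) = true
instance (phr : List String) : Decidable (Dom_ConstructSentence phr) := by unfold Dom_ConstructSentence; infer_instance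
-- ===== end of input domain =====

-- B is an alternative run-based decomposition of A's flag state machine; equal return values proved on Pre_ (A mutates nothing).

-- shared tiny helpers: membership in the punctuation set, and w[0].upper() + w[1:]
def csIsP (w : String) : Bool := w == "," || w == "." || w == "?" || w == "!"

-- w[0].upper() + w[1:]; the [] case is unreachable under Pre_ (Python raises IndexError there)
def csCap (w : String) : String :=
  match w.toList with
  | [] => ""
  | c :: cs => String.ofList (PySem.Chars.upperChar c :: cs)

-- ===== PORT A =====
-- state = (punc, first, result); result[-1] = w ported as dropLast ++ [w]
def csaStep (st : Bool × Bool × List String) (w : String) : Bool × Bool × List String :=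
  let punc := st.1
  let first := st.2.1
  let result := st.2.2
  let tpunc := csIsP w
  if tpunc && first then st
  else if first then (punc, false, result ++ [csCap w])
  else if punc && tpunc then (tpunc, first, result.dropLast ++ [w])
  else (tpunc, first, result ++ [w])

def ConstructSentence (phr : List String) : List String :=
  (phr.foldl csaStep (false, true, [])).2.2

-- ===== PORT B =====
-- the run scan: the two inner 'while' loops are the takeWhile/dropWhile scans
def csbLoop (result : List String) (l : List String) : List String :=
  match l with
  | [] => result
  | w :: ws =>
    if csIsP w then
      let run := List.takeWhile csIsP (w :: ws)
      let rest := List.dropWhile csIsP (w :: ws)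
      let result' := if result.isEmpty then result else result ++ [run.getLastD ""]
      csbLoop result' rest
    else
      let run := List.takeWhile (fun x => !csIsP x) (w :: ws)
      let rest := List.dropWhile (fun x => !csIsP x) (w :: ws)
      csbLoop (result ++ run) rest
  termination_by l.length
  decreasing_by
  all_goals
    simp only [List.dropWhile_cons, *]
    simp only [if_pos trivial, List.length_cons]
    first
      | exact Nat.lt_succ_of_le (List.length_dropWhile_le csIsP ws)
      | exact Nat.lt_succ_of_le (List.length_dropWhile_le (fun x => !csIsP x) ws)

def ConstructSentence_alt (phr : List String) : List String :=
  match csbLoop [] phr with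
  | [] => []
  | r :: rs => csCap r :: rs

-- ===== PRECONDITION & SPEC =====
-- Pre_ excludes exactly the inputs where Python A raises IndexError (the first
-- non-punctuation token is the empty string; both A and B raise there).
def Pre_ConstructSentence (phr : List String) : Prop :=
  (phr.dropWhile (fun w => w == "," || w == "." || w == "?" || w == "!")).head? ≠ some ""
instance (phr : List String) : Decidable (Pre_ConstructSentence phr) := by
  unfold Pre_ConstructSentence; infer_instance

def pvWitness_ConstructSentence : List String := [",", "hello", "world", ".", "."]

def Spec_ConstructSentence (phr : List String) (out : List String) : Prop := out = ConstructSentence_alt phr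
instance (phr : List String) (out : List String) : Decidable (Spec_ConstructSentence phr out) := by unfold Spec_ConstructSentence; infer_instance

-- ===== CLAIM (what is proved, stated in full; the proofs are below) =====
def Claim_equal_ConstructSentence : Prop := ∀ (phr : List String), Dom_ConstructSentence phr → Pre_ConstructSentence phr → Spec_ConstructSentence phr (ConstructSentence phr)

-- ===== LEMMAS AND PROOFS =====

-- the tail produced by csbLoop from a nonempty accumulator does not depend on it
def csbTail (l : List String) : List String :=
  match l with
  | [] => []
  | w :: ws =>
    if csIsP w then
      (List.takeWhile csIsP (w :: ws)).getLastD "" :: csbTail (List.dropWhile csIsP (w :: ws))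
    else
      List.takeWhile (fun x => !csIsP x) (w :: ws) ++ csbTail (List.dropWhile (fun x => !csIsP x) (w :: ws))
  termination_by l.length
  decreasing_by
  all_goals
    simp only [List.dropWhile_cons, *]
    simp only [if_pos trivial, List.length_cons]
    first
      | exact Nat.lt_succ_of_le (List.length_dropWhile_le csIsP ws)
      | exact Nat.lt_succ_of_le (List.length_dropWhile_le (fun x => !csIsP x) ws)

theorem dropWhile_head_false {p : String → Bool} : ∀ (l : List String) (v : String) (vs : List String),
    l.dropWhile p = v :: vs → p v = false := by
  intro l
  induction l with
  | nil => intro v vs h; simp at h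
  | cons w ws ih =>
    intro v vs h
    by_cases hw : p w = true
    · rw [List.dropWhile_cons_of_pos hw] at h; exact ih v vs h
    · rw [List.dropWhile_cons_of_neg hw] at h
      cases h; simpa using hw

theorem csbLoop_ne_nil_aux (n : ℕ) : ∀ (l res : List String), l.length ≤ n → res ≠ [] →
    csbLoop res l = res ++ csbTail l := by
  induction n with
  | zero =>
    intro l res hl _
    match l with
    | [] => simp [csbLoop, csbTail]
    | w :: ws => simp at hl
  | succ n ih =>
    intro l res hl hres
    match l with
    | [] => simp [csbLoop, csbTail]
    | w :: ws =>
      rw [csbLoop, csbTail]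
      have hresE : res.isEmpty = false := by simpa [List.isEmpty_iff] using hres
      by_cases hp : csIsP w = true
      · simp only [hp, if_pos, hresE, Bool.false_eq_true, if_false]
        have hlen : (List.dropWhile csIsP (w :: ws)).length ≤ n := by
          rw [List.dropWhile_cons_of_pos hp]
          have := List.length_dropWhile_le csIsP ws
          simp at hl; omega
        rw [ih _ _ hlen (by simp)]
        simp
      · simp only [hp, Bool.false_eq_true, if_false]
        have hlen : (List.dropWhile (fun x => !csIsP x) (w :: ws)).length ≤ n := by
          rw [List.dropWhile_cons_of_pos (by simpa using hp)]
          have := List.length_dropWhile_le (fun x => !csIsP x) ws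
          simp at hl; omega
        rw [ih _ _ hlen (by simp [hres])]
        simp [List.append_assoc]

theorem csbLoop_ne_nil (res l : List String) (h : res ≠ []) : csbLoop res l = res ++ csbTail l :=
  csbLoop_ne_nil_aux l.length l res le_rfl h

theorem csbTail_cons_of_neg (w : String) (ws : List String) (hw : csIsP w = false) :
    csbTail (w :: ws) = w :: csbTail ws := by
  rw [csbTail]
  simp only [hw, Bool.false_eq_true, if_false]
  rw [List.takeWhile_cons_of_pos (by simp [hw]), List.dropWhile_cons_of_pos (by simp [hw])]
  match ws with
  | [] => simp [csbTail]
  | v :: vs =>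
    by_cases hv : csIsP v = true
    · rw [List.takeWhile_cons_of_neg (by simp [hv]), List.dropWhile_cons_of_neg (by simp [hv])]
      simp
    · conv_rhs => rw [csbTail]
      simp only [hv, Bool.false_eq_true, if_false]
      simp

theorem csbLoop_nil_cons_of_neg (w : String) (ws : List String) (hw : csIsP w = false) :
    csbLoop [] (w :: ws) = csbTail (w :: ws) := by
  rw [csbLoop]
  simp only [hw, Bool.false_eq_true, if_false, List.isEmpty_nil, List.nil_append]
  rw [csbLoop_ne_nil _ _ (by rw [List.takeWhile_cons_of_pos (by simp [hw])]; simp)]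
  rw [csbTail]
  simp [hw]

theorem csbLoop_cons_of_neg (res : List String) (w : String) (ws : List String)
    (hw : csIsP w = false) : csbLoop res (w :: ws) = csbLoop (res ++ [w]) ws := by
  match res with
  | [] =>
    rw [csbLoop_nil_cons_of_neg w ws hw, csbTail_cons_of_neg w ws hw,
        csbLoop_ne_nil _ _ (by simp)]
    simp
  | r :: rs =>
    rw [csbLoop_ne_nil _ _ (by simp), csbLoop_ne_nil _ _ (by simp),
        csbTail_cons_of_neg w ws hw]
    simp

theorem csbLoop_skip (l : List String) : csbLoop [] l = csbLoop [] (l.dropWhile csIsP) := by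
  induction l with
  | nil => simp
  | cons w ws ih =>
    by_cases hp : csIsP w = true
    · rw [List.dropWhile_cons_of_pos hp, ← ih]
      rw [csbLoop]
      simp only [hp, List.isEmpty_nil, if_pos]
      rw [List.dropWhile_cons_of_pos hp]
      exact ih.symm
    · rw [List.dropWhile_cons_of_neg hp]

-- A's loop on a pure punctuation run: each step overwrites the last slot
theorem foldA_punc_run : ∀ (run : List String), (∀ w ∈ run, csIsP w = true) →
    ∀ (res : List String) (x : String),
    run.foldl csaStep (true, false, res ++ [x]) = (true, false, res ++ [run.getLastD x]) := by
  intro run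
  induction run with
  | nil => intro _ res x; simp
  | cons w ws ih =>
    intro h res x
    have hw : csIsP w = true := h w (by simp)
    rw [List.foldl_cons]
    have : csaStep (true, false, res ++ [x]) w = (true, false, res ++ [w]) := by
      simp [csaStep, hw]
    rw [this, ih (fun v hv => h v (by simp [hv])) res w]
    cases ws with
    | nil => simp
    | cons v vs =>
      cases hlast : (v :: vs).getLast? with
      | none => simp [List.getLast?_eq_none_iff] at hlast
      | some a => rfl

theorem foldA_step_nonpunc (p : Bool) (res : List String) (w : String) (ws : List String)
    (hw : csIsP w = false) :
    (w :: ws).foldl csaStep (p, false, res) = ws.foldl csaStep (false, false, res ++ [w]) := by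
  rw [List.foldl_cons]
  have : csaStep (p, false, res) w = (false, false, res ++ [w]) := by
    simp [csaStep, hw]
  rw [this]

theorem mainA (n : ℕ) : ∀ (l res : List String), l.length ≤ n → res ≠ [] →
    (l.foldl csaStep (false, false, res)).2.2 = csbLoop res l := by
  induction n with
  | zero =>
    intro l res hl hres
    match l with
    | [] => simp [csbLoop]
    | w :: ws => simp at hl
  | succ n ih =>
    intro l res hl hres
    match l with
    | [] => simp [csbLoop]
    | w :: ws =>
      simp only [List.length_cons] at hl
      by_cases hp : csIsP w = true
      · -- punctuation run
        have hresE : res.isEmpty = false := by simpa [List.isEmpty_iff] using hres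
        rw [List.foldl_cons]
        have hstep : csaStep (false, false, res) w = (true, false, res ++ [w]) := by
          simp [csaStep, hp]
        rw [hstep]
        have hsplit : ws = List.takeWhile csIsP ws ++ List.dropWhile csIsP ws :=
          (List.takeWhile_append_dropWhile (p := csIsP) (l := ws)).symm
        conv_lhs => rw [hsplit]
        rw [List.foldl_append]
        rw [foldA_punc_run (List.takeWhile csIsP ws) (fun v hv => List.mem_takeWhile_imp hv) res w]
        have hB : csbLoop res (w :: ws) =
            csbLoop (res ++ [(List.takeWhile csIsP ws).getLastD w]) (List.dropWhile csIsP ws) := by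
          rw [csbLoop]
          simp only [hp, hresE, Bool.false_eq_true, if_false, if_pos]
          rw [List.takeWhile_cons_of_pos hp, List.dropWhile_cons_of_pos hp]
          cases List.takeWhile csIsP ws with
          | nil => simp
          | cons a as =>
            cases hlast : (a :: as).getLast? with
            | none => simp [List.getLast?_eq_none_iff] at hlast
            | some b => rfl
        rw [hB]
        have hrlen : (List.dropWhile csIsP ws).length ≤ n := by
          have := List.length_dropWhile_le csIsP ws; omega
        cases hr : List.dropWhile csIsP ws with
        | nil => simp [csbLoop]
        | cons r rs =>
          rw [hr] at hrlen
          have hrp : csIsP r = false := dropWhile_head_false ws r rs hr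
          rw [foldA_step_nonpunc true _ r rs hrp, ← foldA_step_nonpunc false _ r rs hrp]
          exact ih (r :: rs) _ hrlen (by simp)
      · -- word
        have hp' : csIsP w = false := by simpa using hp
        rw [foldA_step_nonpunc false res w ws hp', csbLoop_cons_of_neg res w ws hp']
        exact ih ws _ (by omega) (by simp)

-- A skips a leading punctuation run without touching its state
theorem foldA_skip : ∀ (l : List String) (p : Bool),
    l.foldl csaStep (p, true, []) = (l.dropWhile csIsP).foldl csaStep (p, true, []) := by
  intro l
  induction l with
  | nil => intro p; simp
  | cons w ws ih =>
    intro p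
    by_cases hp : csIsP w = true
    · rw [List.dropWhile_cons_of_pos hp, List.foldl_cons]
      have : csaStep (p, true, []) w = (p, true, []) := by simp [csaStep, hp]
      rw [this, ih p]
    · rw [List.dropWhile_cons_of_neg hp]

-- ===== VERDICT (by name: the statement is the Claim_ definition above) =====
theorem ConstructSentence_spec : Claim_equal_ConstructSentence := by
  intro phr _ hpre
  unfold Spec_ConstructSentence ConstructSentence ConstructSentence_alt
  have hlam : (fun w : String => w == "," || w == "." || w == "?" || w == "!") = csIsP := rfl
  unfold Pre_ConstructSentence at hpre
  rw [hlam] at hpre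
  rw [foldA_skip phr false, csbLoop_skip phr]
  match hd : phr.dropWhile csIsP with
  | [] => simp [csbLoop]
  | v :: vs =>
    have hv : csIsP v = false := dropWhile_head_false phr v vs hd
    rw [hd] at hpre
    rw [List.foldl_cons]
    have : csaStep (false, true, []) v = (false, false, [csCap v]) := by
      simp [csaStep, hv]
    rw [this]
    rw [mainA vs.length vs [csCap v] le_rfl (by simp)]
    rw [csbLoop_ne_nil _ _ (by simp), csbLoop_nil_cons_of_neg v vs hv,
        csbTail_cons_of_neg v vs hv]
    simp
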